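-- pv_equiv track=rewrite | github.com/arianahejazyan/chess-engine | Nyx/utils/mask_methods.py | mask_horizontal_attacks
-- ===== SOURCE A (Python) =====
-- def mask_horizontal_attacks(square: int) -> int:
--     """
--     Generates a bitboard representing the possible horizontal attacks from a given square on a chess board.
--
--     Parameters:
--         square (int): The position of the rook (0-based index) on the chessboard for which to generate attack masks.
--
--     Returns:
--         int: A bitboard representing the possible attack squares along the horizontal direction from the input square.
--
--     Note:
--         - The function assumes that the square parameter is a non-negative integer less than the number of squares on a chessboard (usually 196).
--         - The returned bitboard represents the attack squares along the horizontal direction, considering only the rook's horizontal movement rules.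
--     """
--
--     # Initialize bitboard mask
--     mask = 0
--
--     # Calculate file of the given square
--     f = square % 14  # file
--
--     # Generate attack masks for the horizontal direction in Right-Direction
--     for d in range(1, 13 - f):
--         mask ^= (1 << square + d)
--
--     # Generate attack masks for the horizontal direction in Left-Direction
--     for d in range(1,      f):
--         mask ^= (1 << square - d)
--
--     return mask
-- ===== SOURCE B (Python) =====
-- def mask_horizontal_attacks(square: int) -> int:
--     # Closed form: full rank pattern (bits 1..12) shifted to the rank base,
--     # with the rook's own-square bit removed when it lies in files 1..12.
--     f = square % 14
--     rank = 0x1FFE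
--     if 1 <= f <= 12:
--         rank -= 1 << f
--     return rank << (square - f)
-- ===== Notes on version B (the rewrite author's own statement) =====
-- stated objective: faster
-- what changed: Replaces both per-file XOR loops with a closed-form constant rank pattern 0x1FFE (bits 1..12), subtracting the rook's own-square bit and shifting the pattern to the rank base in O(1).
import Mathlib
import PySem

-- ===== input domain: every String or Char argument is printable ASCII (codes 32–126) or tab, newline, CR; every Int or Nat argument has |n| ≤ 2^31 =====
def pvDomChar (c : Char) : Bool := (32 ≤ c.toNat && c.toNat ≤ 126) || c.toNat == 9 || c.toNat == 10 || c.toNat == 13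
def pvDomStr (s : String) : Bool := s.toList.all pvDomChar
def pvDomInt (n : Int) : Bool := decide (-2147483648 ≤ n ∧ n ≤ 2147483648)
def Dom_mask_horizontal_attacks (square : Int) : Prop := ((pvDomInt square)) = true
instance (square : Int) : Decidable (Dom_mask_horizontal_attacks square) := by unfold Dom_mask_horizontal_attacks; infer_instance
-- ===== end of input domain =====

-- B replaces the two per-file XOR loops with a closed-form rank pattern (0x1FFE, minus the
-- own-square bit, shifted to the rank base); A and B raise on negative squares (Pre_ excludes them).


-- ===== PORT A =====
def mask_horizontal_attacks (square : Int) : Int :=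
  let f := PySem.Int.mod square 14
  let mask : Int := (PySem.List.pyRange 1 (13 - f) 1).foldl
      (fun m d => PySem.Int.bxor m ((1 : Int) <<< (square + d).toNat)) 0
  (PySem.List.pyRange 1 f 1).foldl
      (fun m d => PySem.Int.bxor m ((1 : Int) <<< (square - d).toNat)) mask

-- ===== PORT B =====
def mask_horizontal_attacks_alt (square : Int) : Int :=
  let f := PySem.Int.mod square 14
  let rank : Int := if 1 ≤ f ∧ f ≤ 12 then 0x1FFE - ((1 : Int) <<< f.toNat) else 0x1FFE
  rank <<< (square - f).toNat

-- ===== PRECONDITION & SPEC =====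
-- Python raises ValueError ('negative shift count') for every negative square, in A and in B alike.
def Pre_mask_horizontal_attacks (square : Int) : Prop := 0 ≤ square
instance (square : Int) : Decidable (Pre_mask_horizontal_attacks square) := by unfold Pre_mask_horizontal_attacks; infer_instance
def pvWitness_mask_horizontal_attacks : Int := 17

def Spec_mask_horizontal_attacks (square : Int) (out : Int) : Prop := out = mask_horizontal_attacks_alt square
instance (square : Int) (out : Int) : Decidable (Spec_mask_horizontal_attacks square out) := by unfold Spec_mask_horizontal_attacks; infer_instance

-- ===== CLAIM (what is proved, stated in full; the proofs are below) =====
def Claim_equal_mask_horizontal_attacks : Prop := ∀ (square : Int), Dom_mask_horizontal_attacks square → Pre_mask_horizontal_attacks square → Spec_mask_horizontal_attacks square (mask_horizontal_attacks square)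

-- ===== LEMMAS AND PROOFS =====

-- xor of disjoint bit patterns is their or (general Nat fact; not in the library)
theorem pv_xor_eq_or_of_and_eq_zero (a b : Nat) (h : a &&& b = 0) : a ^^^ b = a ||| b := by
  apply Nat.eq_of_testBit_eq
  intro i
  have h2 := congrArg (fun x => Nat.testBit x i) h
  simp only [Nat.testBit_and] at h2
  simp only [Nat.testBit_xor, Nat.testBit_or]
  cases ha : a.testBit i <;> cases hb : b.testBit i <;> simp_all

-- xor-ing in a fresh higher bit is addition
theorem pv_xor_hi (a k : Nat) (h : a < 2 ^ k) : a ^^^ 2 ^ k = a + 2 ^ k := by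
  have hand : a &&& 2 ^ k = 0 := by
    rw [Nat.and_two_pow, Nat.testBit_lt_two_pow h]
    simp
  rw [pv_xor_eq_or_of_and_eq_zero _ _ hand, Nat.or_comm]
  have := Nat.two_pow_add_eq_or_of_lt (i := k) (b := a) h 1
  simp only [Nat.mul_one] at this
  omega

-- xor-ing a bit below a multiple of the next power is addition
theorem pv_xor_lo (m k : Nat) : (m * 2 ^ (k + 1)) ^^^ 2 ^ k = m * 2 ^ (k + 1) + 2 ^ k := by
  have hand : (m * 2 ^ (k + 1)) &&& 2 ^ k = 0 := by
    rw [Nat.and_two_pow, Nat.testBit_mul_two_pow]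
    simp
  rw [pv_xor_eq_or_of_and_eq_zero _ _ hand]
  have := Nat.two_pow_add_eq_or_of_lt (i := k + 1) (b := 2 ^ k)
      (by exact Nat.pow_lt_pow_right (by norm_num) (Nat.lt_succ_self k)) m
  rw [Nat.mul_comm (2 ^ (k + 1)) m] at this
  omega

-- the right-direction loop: consecutive rising bits above n
theorem pv_right_loop (n : Nat) : ∀ j : Nat,
    (List.range j).foldl (fun (m : Nat) k => m ^^^ 2 ^ (n + 1 + k)) 0
      = 2 ^ (n + 1) * (2 ^ j - 1) := by
  intro j
  induction j with
  | zero => simp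
  | succ j ih =>
    rw [List.range_succ, List.foldl_append, ih]
    simp only [List.foldl_cons, List.foldl_nil]
    have h2 : 0 < 2 ^ j := Nat.two_pow_pos j
    have e1 : 2 ^ (n + 1 + j) = 2 ^ (n + 1) * 2 ^ j := by rw [← Nat.pow_add]
    have hlt : 2 ^ (n + 1) * (2 ^ j - 1) < 2 ^ (n + 1 + j) := by
      rw [e1]
      have hA : 0 < 2 ^ (n + 1) := Nat.two_pow_pos (n + 1)
      zify [h2]
      nlinarith [hA, h2]
    rw [pv_xor_hi _ _ hlt, e1, Nat.pow_succ]
    zify [h2, Nat.one_le_two_pow]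
    ring

-- the left-direction loop: consecutive falling bits below n, starting from a multiple of 2^(n+1)
theorem pv_left_loop (n c : Nat) : ∀ j : Nat, j ≤ n →
    (List.range j).foldl (fun (m : Nat) k => m ^^^ 2 ^ (n - (1 + k))) (c * 2 ^ (n + 1))
      = c * 2 ^ (n + 1) + 2 ^ (n - j) * (2 ^ j - 1) := by
  intro j
  induction j with
  | zero => simp
  | succ j ih =>
    intro hj
    rw [List.range_succ, List.foldl_append, ih (by omega)]
    simp only [List.foldl_cons, List.foldl_nil]
    obtain ⟨i, hi⟩ : ∃ i, n = j + 1 + i := ⟨n - (j + 1), by omega⟩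
    subst hi
    have e1 : j + 1 + i - j = i + 1 := by omega
    have e2 : j + 1 + i - (1 + j) = i := by omega
    have e3 : j + 1 + i - (j + 1) = i := by omega
    rw [e1, e2, e3]
    have eM : c * 2 ^ (j + 1 + i + 1) + 2 ^ (i + 1) * (2 ^ j - 1)
        = (c * 2 ^ (j + 1) + (2 ^ j - 1)) * 2 ^ (i + 1) := by
      have : 2 ^ (j + 1 + i + 1) = 2 ^ (j + 1) * 2 ^ (i + 1) := by
        rw [← Nat.pow_add]; ring_nf
      rw [this]; ring
    rw [eM, pv_xor_lo]
    have h2 : 0 < 2 ^ j := Nat.two_pow_pos j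
    have e4 : 2 ^ (j + 1 + i + 1) = 2 ^ (j + 1) * 2 ^ (i + 1) := by
      rw [← Nat.pow_add]; ring_nf
    have e5 : 2 ^ (i + 1) = 2 * 2 ^ i := by rw [Nat.pow_succ]; ring
    have e6 : 2 ^ (j + 1) = 2 * 2 ^ j := by rw [Nat.pow_succ]; ring
    rw [e4, e5, e6]
    have h3 : 1 ≤ 2 * 2 ^ j := by omega
    zify [h2, h3, Nat.one_le_two_pow]
    ring

-- casting: an Int fold of bxor with power-of-two shifts is the Nat fold of xor
theorem pv_fold_bxor_cast (l : List Nat) (g : Nat → Nat) (init : Nat) :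
    l.foldl (fun (m : Int) k => PySem.Int.bxor m ((1 : Int) <<< g k)) (init : Int)
      = ((l.foldl (fun (m : Nat) k => m ^^^ 2 ^ g k) init : Nat) : Int) := by
  induction l generalizing init with
  | nil => simp
  | cons x xs ih =>
    simp only [List.foldl_cons]
    have hs : (1 : Int) <<< g x = ((2 ^ g x : Nat) : Int) := by
      rw [Int.shiftLeft_eq]; push_cast; ring
    rw [hs, PySem.Int.bxor_natCast, ih]

theorem mask_horizontal_attacks_eq (n : Nat) :
    mask_horizontal_attacks (n : Int) = mask_horizontal_attacks_alt (n : Int) := by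
  have hF : n % 14 < 14 := Nat.mod_lt _ (by norm_num)
  have hFn : n % 14 ≤ n := Nat.mod_le _ _
  have hm : PySem.Int.mod (n : Int) 14 = ((n % 14 : Nat) : Int) := by
    exact_mod_cast PySem.Int.mod_natCast n 14
  unfold mask_horizontal_attacks mask_horizontal_attacks_alt
  simp only [hm, PySem.List.pyRange_one, List.foldl_map, Int.toNat_natCast]
  have h1 : ((13 - (↑(n % 14) : Int)) - 1).toNat = 12 - n % 14 := by omega
  have h2 : (((n % 14 : Nat) : Int) - 1).toNat = n % 14 - 1 := by omega
  rw [h1, h2]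
  -- normalize shift amounts in the right loop and cast it to Nat
  have hright : List.foldl (fun (x : Int) (y : Nat) => PySem.Int.bxor x ((1:Int) <<< ((n:Int) + (1 + (y:Int))).toNat)) 0 (List.range (12 - n % 14))
      = (((List.range (12 - n % 14)).foldl (fun (m : Nat) k => m ^^^ 2 ^ (n + 1 + k)) 0 : Nat) : Int) := by
    rw [PySem.List.foldl_congr_mem _ _
        (fun (x : Int) (y : Nat) => PySem.Int.bxor x ((1:Int) <<< (n + 1 + y))) 0
        (by intro acc x hx
            have he : ((n:Int) + (1 + (x:Int))).toNat = n + 1 + x := by omega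
            rw [he])]
    exact_mod_cast pv_fold_bxor_cast (List.range (12 - n % 14)) (fun k => n + 1 + k) 0
  rw [hright]
  set c : Nat := (List.range (12 - n % 14)).foldl (fun (m : Nat) k => m ^^^ 2 ^ (n + 1 + k)) 0 with hc
  -- normalize shift amounts in the left loop and cast it to Nat
  have hleft : List.foldl (fun (x : Int) (y : Nat) => PySem.Int.bxor x ((1:Int) <<< ((n:Int) - (1 + (y:Int))).toNat)) (c : Int) (List.range (n % 14 - 1))
      = (((List.range (n % 14 - 1)).foldl (fun (m : Nat) k => m ^^^ 2 ^ (n - (1 + k))) c : Nat) : Int) := by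
    rw [PySem.List.foldl_congr_mem _ _
        (fun (x : Int) (y : Nat) => PySem.Int.bxor x ((1:Int) <<< (n - (1 + y)))) (c : Int)
        (by intro acc x hx
            simp only [List.mem_range] at hx
            have he : ((n:Int) - (1 + (x:Int))).toNat = n - (1 + x) := by omega
            rw [he])]
    exact_mod_cast pv_fold_bxor_cast (List.range (n % 14 - 1)) (fun k => n - (1 + k)) c
  rw [hleft]
  rw [pv_right_loop n (12 - n % 14)] at hc
  rw [Nat.mul_comm] at hc
  rw [hc, pv_left_loop n (2 ^ (12 - n % 14) - 1) (n % 14 - 1) (by omega)]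
  -- name the file and the base offset
  generalize hFdef : n % 14 = F at *
  obtain ⟨b, rfl⟩ := Nat.exists_eq_add_of_le hFn
  have htn : (((F + b : Nat) : Int) - (F : Int)).toNat = b := by omega
  rw [htn, Int.shiftLeft_eq]
  have hsF : (1 : Int) <<< F = 2 ^ F := by rw [Int.shiftLeft_eq]; ring
  rw [hsF]
  by_cases hF0 : F = 0
  · subst hF0
    norm_num
    ring
  · by_cases hF13 : F = 13
    · subst hF13
      norm_num
      have e1 : 13 + b - 12 = b + 1 := by omega
      rw [e1]
      ring
    · have hmid : (1 : Int) ≤ ((F : Nat) : Int) ∧ ((F : Nat) : Int) ≤ 12 := by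
        constructor
        · exact_mod_cast Nat.one_le_iff_ne_zero.mpr hF0
        · exact_mod_cast (by omega : F ≤ 12)
      rw [if_pos hmid]
      have e2 : F + b - (F - 1) = b + 1 := by omega
      rw [e2]
      have hRQ : ((2:Int) ^ (12 - F)) * 2 ^ F = 4096 := by
        rw [← pow_add, show 12 - F + F = 12 by omega]; norm_num
      have hS : ((2:Int) ^ (F - 1)) * 2 = 2 ^ F := by
        rw [← pow_succ, show F - 1 + 1 = F by omega]
      push_cast [Nat.one_le_two_pow]
      linear_combination (2 * (2:Int) ^ b) * hRQ + ((2:Int) ^ b) * hS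

-- ===== VERDICT (by name: the statement is the Claim_ definition above) =====
theorem mask_horizontal_attacks_spec : Claim_equal_mask_horizontal_attacks := by
  intro square _ hpre
  obtain ⟨n, rfl⟩ := Int.eq_ofNat_of_zero_le hpre
  exact mask_horizontal_attacks_eq n
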